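-- pv_equiv track=rewrite | github.com/lihongji98/transformer_infer | utils.py | glue_tokens_sentence
-- ===== SOURCE A (Python) =====
-- from typing import List
--
-- def glue_tokens_sentence(output: List[str]) -> str:
--     return_sentence = ""
--     for token in output:
--         if token[-2:] != "@@":
--             return_sentence += token + " "
--         else:
--             return_sentence += token[:-2]
--
--     return return_sentence.rstrip()
-- ===== SOURCE B (Python) =====
-- def glue_tokens_sentence(output):
--     n = len(output)
--     words = []
--     i = 0
--     while i < n:
--         j = i
--         while j < n and output[j].endswith("@@"):
--             j += 1
--         word = "".join(t[:-2] for t in output[i:j])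
--         if j < n:
--             word += output[j]
--             j += 1
--         words.append(word)
--         i = j
--     return " ".join(words).rstrip()
-- ===== Notes on version B (the rewrite author's own statement) =====
-- stated objective: alternative
-- what changed: B scans the token list by word boundaries: an outer index loop finds each maximal run of '@@'-suffixed tokens plus its closing token, builds that whole word at once from a slice of the list (''.join of the de-marked run), collects the words, and finally emits ' '.join(words).rstrip() - staged word-segmentation instead of A's single character-accumulating fold.
import Mathlib
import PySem

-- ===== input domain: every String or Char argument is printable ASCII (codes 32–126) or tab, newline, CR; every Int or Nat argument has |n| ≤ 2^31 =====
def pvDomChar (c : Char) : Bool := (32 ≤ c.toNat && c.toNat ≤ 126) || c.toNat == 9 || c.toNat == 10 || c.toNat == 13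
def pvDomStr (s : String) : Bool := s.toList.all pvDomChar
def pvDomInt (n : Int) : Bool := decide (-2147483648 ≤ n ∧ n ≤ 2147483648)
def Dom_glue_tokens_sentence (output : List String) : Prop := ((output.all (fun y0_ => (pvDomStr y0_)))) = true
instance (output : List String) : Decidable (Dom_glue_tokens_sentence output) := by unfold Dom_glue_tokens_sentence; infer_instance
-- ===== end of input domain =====

-- B segments the token list into whole words (each a maximal run of '@@'-suffixed tokens
-- plus its closing token, built at once from a slice of the list) and emits
-- ' '.join(words).rstrip(), instead of A's single character-accumulating fold; equal cost.

-- ===== PORT A =====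
def glue_tokens_sentence (output : List String) : String :=
  PySem.Str.rstrip
    (output.foldl
      (fun return_sentence token =>
        if PySem.Str.slice token (some (-2)) none ≠ "@@" then
          return_sentence ++ token ++ " "
        else
          return_sentence ++ PySem.Str.slice token none (some (-2)))
      "")

-- ===== PORT B =====
/-- B's outer word loop: the inner `while` advancing `j` over `@@`-suffixed tokens is the
`takeWhile`/`dropWhile` split of the remaining list (`output[i:j]` is exactly the run). -/
def pvWordsOf (l : List String) : List String :=
  if l = [] then []
  else
    let run := l.takeWhile (fun t => PySem.Str.endswith t "@@")
    let w := PySem.Str.join "" (run.map (fun t => PySem.Str.slice t none (some (-2))))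
    match hrest : l.dropWhile (fun t => PySem.Str.endswith t "@@") with
    | [] => [w]
    | t :: rest' => (w ++ t) :: pvWordsOf rest'
termination_by l.length
decreasing_by
  have h := List.length_dropWhile_le (p := fun t => PySem.Str.endswith t "@@") (l := l)
  rw [hrest] at h
  simp at h
  omega

def glue_tokens_sentence_alt (output : List String) : String :=
  PySem.Str.rstrip (PySem.Str.join " " (pvWordsOf output))

-- ===== PRECONDITION & SPEC =====
def Spec_glue_tokens_sentence (output : List String) (out : String) : Prop := out = glue_tokens_sentence_alt output
instance (output : List String) (out : String) : Decidable (Spec_glue_tokens_sentence output out) := by unfold Spec_glue_tokens_sentence; infer_instance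

-- ===== CLAIM (what is proved, stated in full; the proofs are below) =====
def Claim_equal_glue_tokens_sentence : Prop := ∀ (output : List String), Dom_glue_tokens_sentence output → Spec_glue_tokens_sentence output (glue_tokens_sentence output)

-- ===== LEMMAS AND PROOFS =====

lemma pvSpaceToList : (" " : String).toList = [' '] := rfl
lemma pvAtToList : ("@@" : String).toList = ['@', '@'] := rfl

/-- What one token contributes to A's accumulator, at the `List Char` level. -/
def pvContrib (t : List Char) : List Char :=
  if t.drop (t.length - 2) ≠ ['@', '@'] then t ++ [' '] else t.take (t.length - 2)

lemma pvContrib_pos (t : String) (h : t.toList.drop (t.toList.length - 2) = ['@', '@']) :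
    pvContrib t.toList = t.toList.take (t.toList.length - 2) := by
  rw [pvContrib, if_neg (by simpa using h)]

lemma pvContrib_neg (t : String) (h : ¬ t.toList.drop (t.toList.length - 2) = ['@', '@']) :
    pvContrib t.toList = t.toList ++ [' '] := by
  rw [pvContrib, if_pos (by simpa using h)]

/-- A's test `token[-2:] != "@@"` at the `List Char` level. -/
lemma pvCondA (t : String) :
    (PySem.Str.slice t (some (-2)) none = "@@") ↔ t.toList.drop (t.toList.length - 2) = ['@', '@'] := by
  rw [← String.toList_inj, PySem.Str.toList_slice, PySem.Chars.slice_eq_listSlice,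
    PySem.List.slice_from_neg_ofNat t.toList 2 (by omega), pvAtToList]

/-- B's test `token.endswith("@@")` agrees with A's. -/
lemma pvCondB (t : String) :
    PySem.Str.endswith t "@@" = true ↔ t.toList.drop (t.toList.length - 2) = ['@', '@'] := by
  rw [PySem.Str.endswith_eq, PySem.Chars.endswith_iff]
  constructor
  · intro h
    have := List.suffix_iff_eq_drop.mp h
    simpa using this.symm
  · intro h
    rw [pvAtToList, ← h]
    exact List.drop_suffix _ _

/-- A's loop: the accumulator grows by `pvContrib` of each token. -/
lemma pvFoldA (output : List String) (acc : String) :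
    (output.foldl
      (fun return_sentence token =>
        if PySem.Str.slice token (some (-2)) none ≠ "@@" then
          return_sentence ++ token ++ " "
        else
          return_sentence ++ PySem.Str.slice token none (some (-2)))
      acc).toList = acc.toList ++ output.flatMap (fun t => pvContrib t.toList) := by
  induction output generalizing acc with
  | nil => simp
  | cons t rest ih =>
    simp only [List.foldl_cons, List.flatMap_cons]
    by_cases h : t.toList.drop (t.toList.length - 2) = ['@', '@']
    · rw [if_neg (by simpa using (pvCondA t).mpr h), ih, pvContrib_pos t h]
      simp [String.toList_append, PySem.List.slice_to_neg_ofNat t.toList 2 (by omega)]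
    · rw [if_pos (by simpa using fun hc => h ((pvCondA t).mp hc)), ih, pvContrib_neg t h]
      simp [String.toList_append, pvSpaceToList]

/-- Joining with the empty separator is concatenation. -/
lemma pvJoinEmpty (ws : List (List Char)) : PySem.Chars.join [] ws = ws.flatten := by
  induction ws with
  | nil => simp [PySem.Chars.join_nil]
  | cons w ws ih =>
    cases ws with
    | nil => simp [PySem.Chars.join_singleton]
    | cons w' ws' => rw [PySem.Chars.join_cons_cons, ih]; simp

/-- The glued run of `@@`-tokens equals their contributions to A's accumulator. -/
lemma pvRunChars (run : List String)
    (hall : ∀ t ∈ run, PySem.Str.endswith t "@@" = true) :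
    (PySem.Str.join "" (run.map (fun t => PySem.Str.slice t none (some (-2))))).toList
      = run.flatMap (fun t => pvContrib t.toList) := by
  rw [PySem.Str.toList_join]
  simp only [List.map_map]
  rw [show (("" : String).toList) = [] from rfl, pvJoinEmpty, List.flatten_eq_flatMap,
    List.flatMap_map]
  apply List.flatMap_congr
  intro t ht
  have h := (pvCondB t).mp (hall t ht)
  rw [pvContrib_pos t h]
  simp [PySem.Str.toList_slice, PySem.List.slice_to_neg_ofNat t.toList 2 (by omega)]

/-- Whether B's last word is "closed" by a non-`@@` token (then A leaves a trailing space). -/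
def pvHasFinal (l : List String) : Bool :=
  match l.getLast? with
  | some t => ! PySem.Str.endswith t "@@"
  | none => false

lemma pvWordsOf_ne_nil (a : String) (l : List String) : pvWordsOf (a :: l) ≠ [] := by
  rw [pvWordsOf]
  simp only [if_neg (List.cons_ne_nil a l)]
  split <;> simp

lemma pvRstripSpace (x : List Char) :
    PySem.Chars.rstrip (x ++ [' ']) = PySem.Chars.rstrip x := by
  simp [PySem.Chars.rstrip, PySem.Chars.isspace]

lemma pvWordsOf_nil : pvWordsOf [] = [] := by
  rw [pvWordsOf]
  rfl

lemma pvWordsOf_eq_single (l : List String) (hne : l ≠ [])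
    (h : l.dropWhile (fun t => PySem.Str.endswith t "@@") = []) :
    pvWordsOf l
      = [PySem.Str.join "" ((l.takeWhile (fun t => PySem.Str.endswith t "@@")).map
          (fun t => PySem.Str.slice t none (some (-2))))] := by
  rw [pvWordsOf, if_neg hne]
  split
  · rfl
  · next t rest' heq => rw [h] at heq; cases heq

lemma pvWordsOf_eq_cons (l : List String) (hne : l ≠ []) (t : String) (rest' : List String)
    (h : l.dropWhile (fun t => PySem.Str.endswith t "@@") = t :: rest') :
    pvWordsOf l
      = (PySem.Str.join "" ((l.takeWhile (fun t => PySem.Str.endswith t "@@")).map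
          (fun t => PySem.Str.slice t none (some (-2)))) ++ t) :: pvWordsOf rest' := by
  rw [pvWordsOf, if_neg hne]
  split
  · next heq => rw [h] at heq; cases heq
  · next t2 rest2 heq =>
      rw [h] at heq
      cases heq
      rfl

lemma pvContrib_of_not_endswith (t : String) (h : PySem.Str.endswith t "@@" = false) :
    pvContrib t.toList = t.toList ++ [' '] :=
  pvContrib_neg t (fun hd => by rw [(pvCondB t).mpr hd] at h; cases h)

/-- Main invariant: A's accumulated characters are B's space-joined words, plus a trailing
space exactly when the last token closes a word. -/
lemma pvMain (l : List String) :
    l.flatMap (fun t => pvContrib t.toList)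
      = PySem.Chars.join [' '] ((pvWordsOf l).map String.toList)
        ++ (if pvHasFinal l then [' '] else []) := by
  induction l using pvWordsOf.induct with
  | case1 => simp [pvWordsOf_nil, pvHasFinal, PySem.Chars.join_nil]
  | case2 x hne hdrop =>
    have htake : x.takeWhile (fun t => PySem.Str.endswith t "@@") = x := by
      conv_rhs => rw [← List.takeWhile_append_dropWhile
        (p := fun t => PySem.Str.endswith t "@@") (l := x)]
      rw [hdrop, List.append_nil]
    have hall : ∀ t ∈ x, PySem.Str.endswith t "@@" = true := by
      intro t ht
      exact List.mem_takeWhile_imp (p := fun t => PySem.Str.endswith t "@@") (htake ▸ ht)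
    have hfin : pvHasFinal x = false := by
      have h := hall _ (List.getLast_mem hne)
      unfold pvHasFinal
      rw [List.getLast?_eq_some_getLast hne]
      show (! PySem.Str.endswith (x.getLast hne) "@@") = false
      rw [h]
      rfl
    rw [pvWordsOf_eq_single x hne hdrop, htake, hfin]
    simp only [List.map_cons, List.map_nil, PySem.Chars.join_singleton, Bool.false_eq_true,
      if_false, List.append_nil]
    exact (pvRunChars x hall).symm
  | case3 x hne t rest' hdrop ih =>
    have hft : PySem.Str.endswith t "@@" = false := by
      have := List.head?_dropWhile_not (fun t => PySem.Str.endswith t "@@") x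
      rw [hdrop] at this
      simpa using this
    have hftc : PySem.Chars.endswith t.toList ['@', '@'] = false := by simpa using hft
    obtain ⟨run, hrun⟩ : ∃ r, x.takeWhile (fun t => PySem.Str.endswith t "@@") = r := ⟨_, rfl⟩
    have hallrun : ∀ s ∈ run, PySem.Str.endswith s "@@" = true := by
      intro s hs
      exact List.mem_takeWhile_imp (p := fun t => PySem.Str.endswith t "@@") (hrun ▸ hs)
    have hsplit : run ++ t :: rest' = x := by
      rw [← hrun, ← hdrop]
      exact List.takeWhile_append_dropWhile
    subst hsplit
    have htk : (run ++ t :: rest').takeWhile (fun t => PySem.Str.endswith t "@@") = run := by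
      rw [List.takeWhile_append_of_pos hallrun]
      simp [hftc]
    rw [pvWordsOf_eq_cons _ (by simp) t rest' hdrop, htk, List.flatMap_append,
      List.flatMap_cons, ← pvRunChars run hallrun, pvContrib_of_not_endswith t hft, ih]
    cases rest' with
    | nil =>
      have hfin : pvHasFinal (run ++ [t]) = true := by
        unfold pvHasFinal
        rw [List.getLast?_append_of_ne_nil _ (by simp)]
        simp [hftc]
      rw [hfin, pvWordsOf_nil]
      simp [pvHasFinal, PySem.Chars.join_singleton, String.toList_append]
    | cons a rest'' =>
      have hwne := pvWordsOf_ne_nil a rest''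
      have hfin : pvHasFinal (run ++ (t :: a :: rest'')) = pvHasFinal (a :: rest'') := by
        unfold pvHasFinal
        rw [List.getLast?_append_of_ne_nil _ (by simp), List.getLast?_cons_cons]
      rw [hfin]
      obtain ⟨y, ys, hy⟩ := List.exists_cons_of_ne_nil hwne
      rw [hy]
      simp only [List.map_cons, PySem.Chars.join_cons_cons, String.toList_append]
      simp

-- ===== VERDICT (by name: the statement is the Claim_ definition above) =====
theorem glue_tokens_sentence_spec : Claim_equal_glue_tokens_sentence := by
  intro output _
  unfold Spec_glue_tokens_sentence glue_tokens_sentence glue_tokens_sentence_alt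
  apply String.toList_inj.mp
  rw [PySem.Str.toList_rstrip, PySem.Str.toList_rstrip, pvFoldA, PySem.Str.toList_join,
    pvSpaceToList]
  rw [show (("" : String).toList) = [] from rfl, List.nil_append, pvMain]
  cases h : pvHasFinal output
  · simp
  · simp [pvRstripSpace]
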